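-- pv_equiv track=rewrite | github.com/pablomarcel/TDPy | interpreter/intent.py | _strip_string_literals
-- ===== SOURCE A (Python) =====
-- def _strip_string_literals(expr: str) -> str:
--     """
--     Remove content inside single/double-quoted strings so identifier extraction
--     doesn't turn string tokens into variables.
--
--     Example: PropsSI("D","T",T,"P",P,fluid)
--       - "D", "T", "P" must NOT create unknowns D/T/P
--     """
--     out: list[str] = []
--     q: str | None = None
--     esc = False
--
--     for ch in expr:
--         if q is None:
--             if ch in ("'", '"'):
--                 q = ch
--                 out.append(" ")
--             else:
--                 out.append(ch)
--         else:
--             # inside quotes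
--             if esc:
--                 esc = False
--                 continue
--             if ch == "\\":
--                 esc = True
--                 continue
--             if ch == q:
--                 q = None
--                 out.append(" ")
--             else:
--                 continue
--
--     return "".join(out)
-- ===== SOURCE B (Python) =====
-- def _strip_string_literals(expr: str) -> str:
--     # Block-scan rewrite: copy whole unquoted slices, then skip each literal
--     # by index jumps (backslash jumps two chars), instead of a per-char state machine.
--     pieces = []
--     i = 0
--     n = len(expr)
--     while i < n:
--         j = i
--         while j < n and expr[j] not in "'\"":
--             j += 1
--         pieces.append(expr[i:j])
--         if j == n:
--             break
--         q = expr[j]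
--         pieces.append(" ")
--         k = j + 1
--         while k < n:
--             c = expr[k]
--             if c == "\\":
--                 k += 2
--             elif c == q:
--                 pieces.append(" ")
--                 k += 1
--                 break
--             else:
--                 k += 1
--         i = k
--     return "".join(pieces)
-- ===== Notes on version B (the rewrite author's own statement) =====
-- stated objective: alternative
-- what changed: Replaced A's per-character state machine (quote/escape flags carried across every char) with a block scan that copies whole unquoted slices and skips each literal by index jumps (backslash advances two positions at once).
import Mathlib
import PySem

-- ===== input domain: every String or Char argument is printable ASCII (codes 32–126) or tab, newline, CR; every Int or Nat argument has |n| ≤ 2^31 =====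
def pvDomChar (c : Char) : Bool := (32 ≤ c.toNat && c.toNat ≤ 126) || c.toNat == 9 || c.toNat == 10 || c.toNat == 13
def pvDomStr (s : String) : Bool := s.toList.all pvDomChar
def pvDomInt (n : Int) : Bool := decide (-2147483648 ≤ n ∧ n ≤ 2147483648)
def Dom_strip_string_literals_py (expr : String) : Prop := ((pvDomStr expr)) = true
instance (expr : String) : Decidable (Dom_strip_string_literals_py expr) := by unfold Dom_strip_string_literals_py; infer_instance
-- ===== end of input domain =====

-- B replaces A's per-character quote/escape state machine by a block scan that copies
-- whole unquoted slices and skips each literal by index jumps (objective: alternative).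

-- ===== PORT A =====
-- one step of A's for-loop over state (out, q, esc); 'continue' = no append, state carried
def stripA_step (st : List Char × Option Char × Bool) (ch : Char) : List Char × Option Char × Bool :=
  match st with
  | (out, none, esc) =>
      if ch = '\'' ∨ ch = '"' then (out ++ [' '], some ch, esc)
      else (out ++ [ch], none, esc)
  | (out, some q, esc) =>
      if esc then (out, some q, false)
      else if ch = '\\' then (out, some q, true)
      else if ch = q then (out ++ [' '], none, esc)
      else (out, some q, esc)

def strip_string_literals_py (expr : String) : String :=
  String.ofList (expr.toList.foldl stripA_step ([], none, false)).1

-- ===== PORT B =====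
-- inner while k: skip the literal body by jumps; some rest = closed (rest after the close)
def stripB_close (q : Char) : List Char → Option (List Char)
  | [] => none
  | c :: rest =>
      if c = '\\' then
        match rest with
        | [] => none
        | _ :: rest' => stripB_close q rest'
      else if c = q then some rest
      else stripB_close q rest

theorem stripB_close_length {q : Char} : ∀ (l after : List Char),
    stripB_close q l = some after → after.length < l.length := by
  intro l
  induction hn : l.length using Nat.strong_induction_on generalizing l with
  | _ n ih =>
  subst hn
  match l with
  | [] => intro after h; simp [stripB_close] at h
  | c :: rest =>
    intro after h
    rw [stripB_close.eq_def] at h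
    by_cases hc : c = '\\'
    · match rest with
      | [] => simp [hc] at h
      | x :: rest' =>
          simp only [hc] at h
          simp at h
          have := ih rest'.length (by simp) rest' rfl after h
          have hlen : (c :: x :: rest').length = rest'.length + 2 := rfl
          omega
    · by_cases hq : c = q
      · subst hq
        simp [hc] at h
        subst h
        have hlen : (c :: rest).length = rest.length + 1 := rfl
        omega
      · simp [hc, hq] at h
        have := ih rest.length (by simp) rest rfl after h
        have hlen : (c :: rest).length = rest.length + 1 := rfl
        omega

def stripB_notQuote (c : Char) : Bool := !(c = '\'' || c = '"')

-- outer while i: copy the unquoted slice, then handle one literal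
def stripB_go (s : List Char) : List Char :=
  let pre := s.takeWhile stripB_notQuote
  match h : s.dropWhile stripB_notQuote with
  | [] => pre
  | q :: tail =>
      pre ++ ' ' ::
        (match h2 : stripB_close q tail with
          | none => []
          | some after => ' ' :: stripB_go after)
termination_by s.length
decreasing_by
  have h1 : tail.length < s.length := by
    have := List.length_dropWhile_le (p := stripB_notQuote) (l := s)
    rw [h] at this; simp at this; omega
  exact Nat.lt_trans (stripB_close_length tail after h2) h1

def strip_string_literals_py_alt (expr : String) : String :=
  String.ofList (stripB_go expr.toList)

-- ===== PRECONDITION & SPEC =====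
def Spec_strip_string_literals_py (expr : String) (out : String) : Prop := out = strip_string_literals_py_alt expr
instance (expr : String) (out : String) : Decidable (Spec_strip_string_literals_py expr out) := by unfold Spec_strip_string_literals_py; infer_instance

-- ===== CLAIM (what is proved, stated in full; the proofs are below) =====
def Claim_equal_strip_string_literals_py : Prop := ∀ (expr : String), Dom_strip_string_literals_py expr → Spec_strip_string_literals_py expr (strip_string_literals_py expr)

-- ===== LEMMAS AND PROOFS =====

-- A's accumulated output splits off as a prefix
theorem stripA_step_fst (init : List Char × Option Char × Bool) (ch : Char) :
    (stripA_step init ch).1 = init.1 ++ (stripA_step ([], init.2) ch).1 := by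
  obtain ⟨out, q, esc⟩ := init
  cases q <;> simp [stripA_step] <;> split_ifs <;> simp

theorem stripA_step_snd (init : List Char × Option Char × Bool) (ch : Char) :
    (stripA_step init ch).2 = (stripA_step ([], init.2) ch).2 := by
  obtain ⟨out, q, esc⟩ := init
  cases q <;> simp [stripA_step] <;> split_ifs <;> simp

theorem stripA_foldl_split (l : List Char) : ∀ (init : List Char × Option Char × Bool),
    (List.foldl stripA_step init l).1 = init.1 ++ (List.foldl stripA_step ([], init.2) l).1 := by
  induction l with
  | nil => intro init; simp
  | cons c l ih =>
      intro init
      simp only [List.foldl_cons]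
      rw [ih (stripA_step init c), ih (stripA_step ([], init.2) c)]
      rw [stripA_step_fst, stripA_step_snd]
      simp

-- A's tail function (what the fold produces from a given state)
def stripA_tail (st : Option Char × Bool) (l : List Char) : List Char :=
  (List.foldl stripA_step ([], st) l).1

theorem stripA_tail_cons (st : Option Char × Bool) (c : Char) (l : List Char) :
    stripA_tail st (c :: l)
      = (stripA_step ([], st) c).1 ++ stripA_tail (stripA_step ([], st) c).2 l := by
  simp only [stripA_tail, List.foldl_cons]
  exact stripA_foldl_split l (stripA_step ([], st) c)

-- what A produces from inside a literal, phrased through B's close-scan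
def stripA_close (q : Char) (l : List Char) : List Char :=
  (stripB_close q l).elim [] (fun after => ' ' :: stripA_tail (none, false) after)

theorem stripA_inside (q : Char) : ∀ (l : List Char),
    stripA_tail (some q, false) l = stripA_close q l := by
  intro l
  induction hn : l.length using Nat.strong_induction_on generalizing l with
  | _ n ih =>
  subst hn
  match l with
  | [] => simp [stripA_tail, stripA_close, stripB_close]
  | c :: rest =>
    by_cases hc : c = '\\'
    · subst hc
      rw [stripA_tail_cons]
      simp only [stripA_step]
      match rest with
      | [] =>
          have hcl : stripB_close q ['\\'] = none := by
            rw [stripB_close.eq_def]; simp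
          simp [stripA_tail, stripA_close, hcl]
      | x :: rest' =>
          rw [stripA_tail_cons]
          simp only [stripA_step]
          have hcl : stripB_close q ('\\' :: x :: rest') = stripB_close q rest' := by
            rw [stripB_close.eq_def]; simp
          simp only [stripA_close, hcl]
          have := ih rest'.length (by simp) rest' rfl
          simpa [stripA_close] using this
    · by_cases hq : c = q
      · subst hq
        rw [stripA_tail_cons]
        have hcl : stripB_close c (c :: rest) = some rest := by
          rw [stripB_close.eq_def]; simp [hc]
        simp [stripA_step, hc, stripA_close, hcl]
      · rw [stripA_tail_cons]
        have hcl : stripB_close q (c :: rest) = stripB_close q rest := by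
          rw [stripB_close.eq_def]; simp [hc, hq]
        simp only [stripA_close, hcl]
        have := ih rest.length (by simp) rest rfl
        simpa [stripA_step, hc, hq, stripA_close] using this

theorem stripB_go_nil : stripB_go [] = [] := by
  rw [stripB_go]
  split
  · rfl
  · rename_i q tail heq; simp at heq

theorem stripB_go_cons_nq (c : Char) (l : List Char) (h : stripB_notQuote c = true) :
    stripB_go (c :: l) = c :: stripB_go l := by
  have hd : List.dropWhile stripB_notQuote (c :: l) = List.dropWhile stripB_notQuote l := by
    simp [h]
  have ht : List.takeWhile stripB_notQuote (c :: l) = c :: List.takeWhile stripB_notQuote l := by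
    simp [h]
  conv_rhs => rw [stripB_go]
  conv_lhs => rw [stripB_go]
  rw [hd, ht]
  cases hdw : List.dropWhile stripB_notQuote l with
  | nil => rfl
  | cons q tail => simp

theorem stripB_go_cons_q (c : Char) (l : List Char) (h : stripB_notQuote c = false) :
    stripB_go (c :: l)
      = ' ' :: (stripB_close c l).elim [] (fun after => ' ' :: stripB_go after) := by
  have hd : List.dropWhile stripB_notQuote (c :: l) = c :: l := by
    simp [h]
  have ht : List.takeWhile stripB_notQuote (c :: l) = [] := by
    simp [h]
  conv_lhs => rw [stripB_go]
  split
  · rename_i heq; rw [hd] at heq; exact absurd heq (by simp)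
  · rename_i q tail heq
    rw [hd] at heq
    injection heq with e1 e2
    subst e1; subst e2
    rw [ht]
    cases hcl : stripB_close c l with
    | none => simp
    | some after => simp

theorem stripA_eq_stripB_go : ∀ (l : List Char), stripA_tail (none, false) l = stripB_go l := by
  intro l
  induction hn : l.length using Nat.strong_induction_on generalizing l with
  | _ n ih =>
  subst hn
  match l with
  | [] => simp [stripA_tail, stripB_go_nil]
  | c :: l =>
    by_cases hq : c = '\'' ∨ c = '"'
    · have hnq : stripB_notQuote c = false := by
        rcases hq with h | h <;> simp [stripB_notQuote, h]
      rw [stripA_tail_cons]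
      simp only [stripA_step, if_pos hq]
      rw [stripA_inside, stripB_go_cons_q c l hnq]
      cases h2 : stripB_close c l with
      | none => simp [stripA_close, h2]
      | some after =>
          have hlt : after.length < l.length := stripB_close_length l after h2
          simp only [stripA_close, h2, Option.elim]
          rw [ih after.length (by simp; omega) after rfl]
          simp
    · have hnq : stripB_notQuote c = true := by
        simp only [stripB_notQuote, Bool.not_eq_true']
        simp only [Bool.or_eq_false_iff, decide_eq_false_iff_not]
        exact ⟨fun h => hq (Or.inl h), fun h => hq (Or.inr h)⟩
      rw [stripA_tail_cons]
      simp only [stripA_step, if_neg hq]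
      rw [ih l.length (by simp) l rfl, stripB_go_cons_nq c l hnq]
      simp

-- ===== VERDICT (by name: the statement is the Claim_ definition above) =====
theorem strip_string_literals_py_spec : Claim_equal_strip_string_literals_py := by
  intro expr _
  unfold Spec_strip_string_literals_py strip_string_literals_py strip_string_literals_py_alt
  rw [show (expr.toList.foldl stripA_step ([], none, false)).1 = stripA_tail (none, false) expr.toList from rfl,
      stripA_eq_stripB_go]
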